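-- pv_equiv track=rewrite | github.com/carlodenardin/deita | src/methods/crf/crf_labeler.py | list_window
-- ===== SOURCE A (Python) =====
-- from typing import Callable, Dict, List, Tuple
--
-- def list_window(sent: List, center: int, window: Tuple[int, int], oob_item=None) -> List:
--     """
--     Get a window of tokens within a sentence.
--
--     Parameters
--     ----------
--     sent : List
--         A list of tokens.
--     center : int
--         The index acting as center of the window.
--     window : Tuple[int, int]
--         The window width. `window[0]` is elements before center, `window[1]` is elements after
--         center. Interval is closed.
--     oob_item : type
--         The item to return if window indexes are out of bounds of `sent`.
--
--     Returns
--     -------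
--     tokens : List
--         The tokens within the given window.
--
--     """
--     tokens = []
--     for i in range(center - window[0], center + window[1] + 1):
--         if i < 0:
--             tokens.append(oob_item)
--         elif i >= len(sent):
--             tokens.append(oob_item)
--         else:
--             tokens.append(sent[i])
--     return tokens
-- ===== SOURCE B (Python) =====
-- def list_window(sent, center, window, oob_item=None):
--     start = center - window[0]
--     end = center + window[1] + 1
--     n = len(sent)
--     left = max(0, min(end, 0) - start)
--     right = max(0, end - max(start, n))
--     middle = sent[max(0, start):max(0, min(end, n))]
--     return [oob_item] * left + middle + [oob_item] * right
-- ===== Notes on version B (the rewrite author's own statement) =====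
-- stated objective: simpler
-- what changed: Replaces the per-index loop with three elementwise branches by closed-form padding counts (left/right) plus one clamped slice for the in-bounds middle.
import Mathlib
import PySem

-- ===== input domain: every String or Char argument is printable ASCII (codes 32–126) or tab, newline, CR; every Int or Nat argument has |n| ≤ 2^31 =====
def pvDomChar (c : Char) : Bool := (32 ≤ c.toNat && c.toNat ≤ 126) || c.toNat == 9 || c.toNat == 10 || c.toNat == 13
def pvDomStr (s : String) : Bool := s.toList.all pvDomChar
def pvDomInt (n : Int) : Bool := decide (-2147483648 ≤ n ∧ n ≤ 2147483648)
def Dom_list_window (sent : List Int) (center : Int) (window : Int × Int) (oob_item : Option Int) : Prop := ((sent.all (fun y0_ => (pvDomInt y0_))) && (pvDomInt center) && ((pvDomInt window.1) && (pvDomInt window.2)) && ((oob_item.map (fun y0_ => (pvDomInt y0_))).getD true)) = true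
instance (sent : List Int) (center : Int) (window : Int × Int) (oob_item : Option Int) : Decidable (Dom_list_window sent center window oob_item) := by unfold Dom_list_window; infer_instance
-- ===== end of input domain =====

-- B computes the window as closed-form left/right OOB padding counts plus one clamped slice,
-- instead of A's per-index loop with elementwise bounds branches (objective: simpler).


-- ===== PORT A =====
-- literal port: for i in range(center-window[0], center+window[1]+1): append oob / oob / sent[i]
-- (in the final branch 0 ≤ i < len sent, so pyGet? sent i is `some (sent[i])`, the Option Int appended)
def list_window (sent : List Int) (center : Int) (window : Int × Int) (oob_item : Option Int) : List (Option Int) :=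
  (PySem.List.pyRange (center - window.1) (center + window.2 + 1) 1).foldl
    (fun tokens i =>
      if i < 0 then tokens ++ [oob_item]
      else if (sent.length : Int) ≤ i then tokens ++ [oob_item]
      else tokens ++ [PySem.List.pyGet? sent i]) []

-- ===== PORT B =====
def list_window_alt (sent : List Int) (center : Int) (window : Int × Int) (oob_item : Option Int) : List (Option Int) :=
  let start := center - window.1
  let stop := center + window.2 + 1
  let n : Int := sent.length
  let left := max 0 (min stop 0 - start)
  let right := max 0 (stop - max start n)
  let middle := PySem.List.slice sent (some (max 0 start)) (some (max 0 (min stop n)))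
  List.replicate left.toNat oob_item ++ middle.map some ++ List.replicate right.toNat oob_item

-- ===== PRECONDITION & SPEC =====
def Spec_list_window (sent : List Int) (center : Int) (window : Int × Int) (oob_item : Option Int) (out : List (Option Int)) : Prop := out = list_window_alt sent center window oob_item
instance (sent : List Int) (center : Int) (window : Int × Int) (oob_item : Option Int) (out : List (Option Int)) : Decidable (Spec_list_window sent center window oob_item out) := by unfold Spec_list_window; infer_instance

-- ===== CLAIM (what is proved, stated in full; the proofs are below) =====
def Claim_equal_list_window : Prop := ∀ (sent : List Int) (center : Int) (window : Int × Int) (oob_item : Option Int), Dom_list_window sent center window oob_item → Spec_list_window sent center window oob_item (list_window sent center window oob_item)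

-- ===== LEMMAS AND PROOFS =====

-- B's result as a function of the window bounds s (start) and e (stop)
def pvRhs (sent : List Int) (oob : Option Int) (s e : Int) : List (Option Int) :=
  List.replicate (max 0 (min e 0 - s)).toNat oob
    ++ (PySem.List.slice sent (some (max 0 s)) (some (max 0 (min e (sent.length : Int))))).map some
    ++ List.replicate (max 0 (e - max s (sent.length : Int))).toNat oob

-- the element A appends at index i
def pvF (sent : List Int) (oob : Option Int) (i : Int) : Option Int :=
  if i < 0 then oob else if (sent.length : Int) ≤ i then oob else PySem.List.pyGet? sent i

theorem pvF_in (sent : List Int) (oob : Option Int) (i : Int) (h0 : 0 ≤ i) (h1 : i < (sent.length : Int)) :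
    pvF sent oob i = some (sent[i.toNat]'(by omega)) := by
  unfold pvF
  rw [if_neg (by omega), if_neg (by omega)]
  simp [PySem.List.pyGet?, PySem.List.pyIdx?, h0, h1]

theorem pvRhs_empty (sent : List Int) (oob : Option Int) (s e : Int) (h : e ≤ s) :
    pvRhs sent oob s e = [] := by
  unfold pvRhs
  have hn : (0:Int) ≤ (sent.length : Int) := by positivity
  have h1 : (max 0 (min e 0 - s)).toNat = 0 := by omega
  have h3 : (max 0 (e - max s (sent.length : Int))).toNat = 0 := by omega
  rw [h1, h3]
  have hb : (0:Int) ≤ max 0 (min e (sent.length : Int)) := le_max_left _ _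
  have ha : (0:Int) ≤ max 0 s := le_max_left _ _
  rw [PySem.List.slice_toNat sent ha hb]
  have : (max 0 (min e (sent.length : Int))).toNat ≤ (max 0 s).toNat := by omega
  simp [Nat.sub_eq_zero_of_le this]

theorem pvRhs_cons (sent : List Int) (oob : Option Int) (s e : Int) (h : s < e) :
    pvRhs sent oob s e = pvF sent oob s :: pvRhs sent oob (s + 1) e := by
  have hn : (0:Int) ≤ (sent.length : Int) := by positivity
  by_cases hneg : s < 0
  · -- left padding: s < 0
    have hf : pvF sent oob s = oob := by unfold pvF; rw [if_pos hneg]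
    unfold pvRhs
    have hL : (max 0 (min e 0 - s)).toNat = (max 0 (min e 0 - (s+1))).toNat + 1 := by omega
    have ha : max 0 s = max 0 (s+1) := by omega
    have hr : max s (sent.length : Int) = max (s+1) (sent.length : Int) := by omega
    rw [hf, hL, ha, hr, List.replicate_succ]
    simp
  · by_cases hlt : s < (sent.length : Int)
    · -- in bounds: 0 ≤ s < len
      have hf := pvF_in sent oob s (by omega) hlt
      unfold pvRhs
      have hL : (max 0 (min e 0 - s)).toNat = 0 := by omega
      have hL' : (max 0 (min e 0 - (s+1))).toNat = 0 := by omega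
      have hr : max s (sent.length : Int) = max (s+1) (sent.length : Int) := by omega
      have ha : max 0 s = s := by omega
      have ha' : max 0 (s+1) = s + 1 := by omega
      have hb0 : (0:Int) ≤ max 0 (min e (sent.length : Int)) := le_max_left _ _
      rw [hf, hL, hL', hr, ha, ha']
      rw [PySem.List.slice_toNat sent (by omega) hb0, PySem.List.slice_toNat sent (by omega) hb0]
      have hsb : s.toNat < (max 0 (min e (sent.length : Int))).toNat := by omega
      have hdrop : sent.drop s.toNat = sent[s.toNat]'(by omega) :: sent.drop (s.toNat + 1) := by
        rw [List.drop_eq_getElem_cons (by omega)]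
      have htn : (s+1).toNat = s.toNat + 1 := by omega
      have hsub : (max 0 (min e (sent.length : Int))).toNat - s.toNat
          = ((max 0 (min e (sent.length : Int))).toNat - (s.toNat + 1)) + 1 := by omega
      rw [hdrop, hsub, List.take_succ_cons, htn]
      simp
    · -- right padding: s ≥ len
      have hf : pvF sent oob s = oob := by unfold pvF; rw [if_neg hneg, if_pos (by omega)]
      unfold pvRhs
      have hL : (max 0 (min e 0 - s)).toNat = 0 := by omega
      have hL' : (max 0 (min e 0 - (s+1))).toNat = 0 := by omega
      have hR : (max 0 (e - max s (sent.length : Int))).toNat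
          = (max 0 (e - max (s+1) (sent.length : Int))).toNat + 1 := by omega
      have hb0 : (0:Int) ≤ max 0 (min e (sent.length : Int)) := le_max_left _ _
      have hmid : ∀ a : Int, (sent.length : Int) ≤ a →
          PySem.List.slice sent (some (max 0 a)) (some (max 0 (min e (sent.length : Int)))) = [] := by
        intro a hA
        rw [PySem.List.slice_toNat sent (le_max_left _ _) hb0]
        have : (max 0 (min e (sent.length : Int))).toNat ≤ (max 0 a).toNat := by omega
        simp [Nat.sub_eq_zero_of_le this]
      rw [hf, hL, hL', hR, hmid s (by omega), hmid (s+1) (by omega), List.replicate_succ]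
      simp

theorem pvKey (sent : List Int) (oob : Option Int) :
    ∀ (k : Nat) (s e : Int), (e - s).toNat = k →
      (PySem.List.pyRange s e 1).map (pvF sent oob) = pvRhs sent oob s e := by
  intro k
  induction k with
  | zero =>
    intro s e hk
    rw [PySem.List.pyRange_one_eq_nil (by omega), pvRhs_empty sent oob s e (by omega)]
    rfl
  | succ m ih =>
    intro s e hk
    rw [PySem.List.pyRange_one_cons (by omega), List.map_cons,
        ih (s+1) e (by omega), pvRhs_cons sent oob s e (by omega)]

theorem pvA_as_map (sent : List Int) (center : Int) (window : Int × Int) (oob : Option Int) :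
    list_window sent center window oob
      = (PySem.List.pyRange (center - window.1) (center + window.2 + 1) 1).map (pvF sent oob) := by
  unfold list_window
  have hbody : (fun (tokens : List (Option Int)) (i : Int) =>
      if i < 0 then tokens ++ [oob]
      else if (sent.length : Int) ≤ i then tokens ++ [oob]
      else tokens ++ [PySem.List.pyGet? sent i])
      = fun tokens i => tokens ++ [pvF sent oob i] := by
    funext tokens i
    unfold pvF
    split_ifs <;> rfl
  rw [hbody, PySem.List.foldl_append_singleton_eq_map]
  simp

theorem pvB_as_rhs (sent : List Int) (center : Int) (window : Int × Int) (oob : Option Int) :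
    list_window_alt sent center window oob
      = pvRhs sent oob (center - window.1) (center + window.2 + 1) := rfl

-- ===== VERDICT (by name: the statement is the Claim_ definition above) =====
theorem list_window_spec : Claim_equal_list_window := by
  intro sent center window oob_item _
  unfold Spec_list_window
  rw [pvA_as_map, pvB_as_rhs, pvKey sent oob_item
    ((center + window.2 + 1) - (center - window.1)).toNat (center - window.1) (center + window.2 + 1) rfl]
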